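-- pv_equiv track=rewrite | github.com/Pooky112/Baekjoon | 프로그래머스/3/87694. 아이템 줍기/아이템 줍기.py | solution
-- ===== SOURCE A (Python) =====
-- from collections import deque
--
-- def solution(rectangle, characterX, characterY, itemX, itemY):
--     #2배를 해주어 정확도를 높여주어야 한다. 완전히 겹치지는 않더라도 맞닿을 경우
--     #잘못된 길을 통해서 갈 수 있기 때문에 제대로 된 답이 나오지 않을 수가 있음
--     #visited를 사용하지 않는 방법은?
--     graph = [[0] * 101 for _ in range(101)]
--     #visited = [[False] * 101 for _ in range(101)]
--     for x1, y1, x2, y2 in rectangle: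
--         for i in range(x1 * 2, x2 *2 + 1):
--             for j in range(y1 * 2, y2 * 2 + 1):
--                 if x1 * 2 < i < x2 * 2 and y1 * 2 < j < y2 * 2:
--                     graph[i][j] = -1
--                 elif graph[i][j] != -1:
--                     graph[i][j] = 1
--
--     queue = deque([(characterX * 2, characterY * 2)])
--     graph[characterX * 2][characterY * 2] = 2
--     distance = 0
--
--     while queue:
--         for _ in range(len(queue)):
--             x, y = queue.popleft()
--             if x == itemX * 2 and y == itemY * 2:
--                 return distance // 2 # 격자 확장을 위해 거리를 2로 나눔
--             for dx, dy in [(1, 0), (0, 1), (-1, 0), (0, -1)]: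
--                 nx, ny = x + dx, y + dy
--                 if 0 <= nx < 101 and 0 <= ny < 101 and graph[nx][ny] == 1:
--                     queue.append((nx, ny))
--                     graph[nx][ny] = 2
--         distance += 1
--
--     return -1  # 경로를 찾을 수 없는 경우
-- ===== SOURCE B (Python) =====
-- from collections import deque
--
-- def solution(rectangle, characterX, characterY, itemX, itemY):
--     # predicate-based cell classification (no grid build) + distance-carrying BFS
--     def walkable(i, j):
--         inside = False
--         for x1, y1, x2, y2 in rectangle:
--             if x1 * 2 < i < x2 * 2 and y1 * 2 < j < y2 * 2:
--                 return False
--             if x1 * 2 <= i <= x2 * 2 and y1 * 2 <= j <= y2 * 2: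
--                 inside = True
--         return inside
--
--     start = (characterX * 2, characterY * 2)
--     target = (itemX * 2, itemY * 2)
--     visited = {start}
--     queue = deque([(start, 0)])
--     while queue:
--         (x, y), d = queue.popleft()
--         if (x, y) == target:
--             return d // 2
--         for nx, ny in ((x + 1, y), (x, y + 1), (x - 1, y), (x, y - 1)):
--             if 0 <= nx < 101 and 0 <= ny < 101 and (nx, ny) not in visited and walkable(nx, ny):
--                 visited.add((nx, ny))
--                 queue.append(((nx, ny), d + 1))
--     return -1
-- ===== Notes on version B (the rewrite author's own statement) =====
-- stated objective: alternative
-- what changed: B replaces A's mutable 101x101 grid (full-area classification fill, in-grid 2-marking, level-counted deque BFS) by a pure per-cell walkability predicate over the rectangle list, an explicit visited set, and a BFS whose queue carries each cell's distance.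
-- outside the precondition, e.g. on solution([[23, -3, 45, 17]], -3, -5, -22, 6): A returns -1, B returns -1; on solution([[0, -1, 2, 2]], 0, 0, 1, 1): A returns -1, B returns -1
import Mathlib
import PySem

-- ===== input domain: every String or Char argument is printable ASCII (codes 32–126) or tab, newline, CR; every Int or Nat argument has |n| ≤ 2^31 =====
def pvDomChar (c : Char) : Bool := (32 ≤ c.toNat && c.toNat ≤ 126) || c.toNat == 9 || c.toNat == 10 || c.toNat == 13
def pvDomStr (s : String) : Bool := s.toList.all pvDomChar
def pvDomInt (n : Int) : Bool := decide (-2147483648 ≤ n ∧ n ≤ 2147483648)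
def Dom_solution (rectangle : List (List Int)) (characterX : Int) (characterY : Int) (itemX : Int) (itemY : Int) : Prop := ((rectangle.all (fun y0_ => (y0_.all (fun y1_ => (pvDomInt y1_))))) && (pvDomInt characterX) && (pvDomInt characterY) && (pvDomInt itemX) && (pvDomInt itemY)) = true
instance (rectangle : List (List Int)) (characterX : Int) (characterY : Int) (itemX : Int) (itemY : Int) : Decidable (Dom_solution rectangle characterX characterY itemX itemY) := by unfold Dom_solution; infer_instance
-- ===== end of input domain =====

-- B replaces A's mutable grid + level-counted BFS by a pure walkability predicate, a visited
-- set and a distance-carrying BFS queue (objective: alternative decomposition, same cost).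

-- ===== PORT A =====
-- graph[i][j] read / write (Python list indexing incl. negative wraparound, exact via PySem)
def gget (g : List (List Int)) (i j : Int) : Int :=
  PySem.List.pyGetD (PySem.List.pyGetD g i []) j 0
def gset (g : List (List Int)) (i j : Int) (v : Int) : List (List Int) :=
  PySem.List.pySetD g i (PySem.List.pySetD (PySem.List.pyGetD g i []) j v)

-- body of A's classification double loop
def buildCell (x1 y1 x2 y2 i j : Int) (g : List (List Int)) : List (List Int) :=
  if x1 * 2 < i ∧ i < x2 * 2 ∧ y1 * 2 < j ∧ j < y2 * 2 then gset g i j (-1)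
  else if gget g i j ≠ -1 then gset g i j 1 else g

-- one iteration of 'for x1, y1, x2, y2 in rectangle'
def applyRect (g : List (List Int)) (r : List Int) : List (List Int) :=
  match r with
  | [x1, y1, x2, y2] =>
      (PySem.List.pyRange (x1 * 2) (x2 * 2 + 1) 1).foldl (fun g i =>
        (PySem.List.pyRange (y1 * 2) (y2 * 2 + 1) 1).foldl (fun g j =>
          buildCell x1 y1 x2 y2 i j g) g) g
  | _ => g   -- unreachable under Pre_ (Python raises ValueError unpacking)

def buildGrid (rectangle : List (List Int)) : List (List Int) :=
  rectangle.foldl applyRect (List.replicate 101 (List.replicate 101 (0 : Int)))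

def dirsA : List (Int × Int) := [(1, 0), (0, 1), (-1, 0), (0, -1)]

-- body of 'for dx, dy in …': append neighbour and mark it 2
def aStep (s : List (List Int) × List (Int × Int)) (nx ny : Int) :
    List (List Int) × List (Int × Int) :=
  if 0 ≤ nx ∧ nx < 101 ∧ 0 ≤ ny ∧ ny < 101 ∧ gget s.1 nx ny = 1 then
    (gset s.1 nx ny 2, s.2 ++ [(nx, ny)])
  else s

def aExpand (g : List (List Int)) (x y : Int) : List (List Int) × List (Int × Int) :=
  dirsA.foldl (fun s dd => aStep s (x + dd.1) (y + dd.2)) (g, [])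

-- 'for _ in range(len(queue))': n pops at the current distance
def aInner (itemX itemY : Int) (g : List (List Int)) (q : List (Int × Int)) (dist : Int) :
    Nat → Sum Int (List (List Int) × List (Int × Int))
  | 0 => .inr (g, q)
  | n + 1 =>
    match q with
    | [] => .inr (g, [])   -- unreachable: n never exceeds the queue length
    | (x, y) :: rest =>
      if x = itemX * 2 ∧ y = itemY * 2 then .inl (PySem.Int.floordiv dist 2)
      else
        let s := aExpand g x y
        aInner itemX itemY s.1 (rest ++ s.2) dist n

-- 'while queue:' (fuel is only a totality guard; 1000000 is never reached)
def aLoop (itemX itemY : Int) : Nat → List (List Int) → List (Int × Int) → Int → Int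
  | 0, _, _, _ => -1
  | fuel + 1, g, q, dist =>
    if q.isEmpty then -1
    else
      match aInner itemX itemY g q dist q.length with
      | .inl r => r
      | .inr (g', q') => aLoop itemX itemY fuel g' q' (dist + 1)

def solution (rectangle : List (List Int)) (characterX : Int) (characterY : Int) (itemX : Int) (itemY : Int) : Int :=
  let g := buildGrid rectangle
  let g1 := gset g (characterX * 2) (characterY * 2) 2
  aLoop itemX itemY 1000000 g1 [(characterX * 2, characterY * 2)] 0

-- ===== PORT B =====
def rectStrict (r : List Int) (i j : Int) : Bool :=
  match r with
  | [x1, y1, x2, y2] => decide (x1 * 2 < i ∧ i < x2 * 2 ∧ y1 * 2 < j ∧ j < y2 * 2)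
  | _ => false   -- unreachable under Pre_
def rectTouch (r : List Int) (i j : Int) : Bool :=
  match r with
  | [x1, y1, x2, y2] => decide (x1 * 2 ≤ i ∧ i ≤ x2 * 2 ∧ y1 * 2 ≤ j ∧ j ≤ y2 * 2)
  | _ => false   -- unreachable under Pre_

-- B's walkable(i, j): loop with early 'return False' and an 'inside' accumulator
def walkGo (rects : List (List Int)) (i j : Int) (inside : Bool) : Bool :=
  match rects with
  | [] => inside
  | r :: rs => if rectStrict r i j then false else walkGo rs i j (inside || rectTouch r i j)

def walkable (rects : List (List Int)) (i j : Int) : Bool := walkGo rects i j false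

-- body of B's neighbour loop: visited set and (cell, distance) queue
def bStep (rects : List (List Int)) (d : Int)
    (s : PySem.Set (Int × Int) × List ((Int × Int) × Int)) (nx ny : Int) :
    PySem.Set (Int × Int) × List ((Int × Int) × Int) :=
  if decide (0 ≤ nx ∧ nx < 101 ∧ 0 ≤ ny ∧ ny < 101) &&
     !(PySem.Set.contains s.1 (nx, ny)) && walkable rects nx ny then
    (PySem.Set.add s.1 (nx, ny), s.2 ++ [((nx, ny), d + 1)])
  else s

def bExpand (rects : List (List Int)) (v : PySem.Set (Int × Int)) (x y d : Int) :
    PySem.Set (Int × Int) × List ((Int × Int) × Int) :=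
  [(x + 1, y), (x, y + 1), (x - 1, y), (x, y - 1)].foldl
    (fun s c => bStep rects d s c.1 c.2) (v, [])

-- B's 'while queue:' (fuel only a totality guard)
def bLoop (rects : List (List Int)) (tX tY : Int) :
    Nat → PySem.Set (Int × Int) → List ((Int × Int) × Int) → Int
  | 0, _, _ => -1
  | fuel + 1, v, q =>
    match q with
    | [] => -1
    | ((x, y), d) :: rest =>
      if x = tX ∧ y = tY then PySem.Int.floordiv d 2
      else
        let s := bExpand rects v x y d
        bLoop rects tX tY fuel s.1 (rest ++ s.2)

def solution_alt (rectangle : List (List Int)) (characterX : Int) (characterY : Int) (itemX : Int) (itemY : Int) : Int :=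
  let start := (characterX * 2, characterY * 2)
  bLoop rectangle (itemX * 2) (itemY * 2) 1000000
    (PySem.Set.ofList [start]) [(start, 0)]

-- ===== PRECONDITION & SPEC =====
-- Pre_ excludes inputs on which A raises (a rectangle row whose length is not 4 → ValueError;
-- coordinates past the 0..50 board → IndexError) and inputs with negative rectangle
-- coordinates on which A marks its grid through Python's negative-index wraparound, an
-- accident of the implementation (on the sampled such inputs both programs return -1 anyway).
def Pre_solution (rectangle : List (List Int)) (characterX : Int) (characterY : Int) (itemX : Int) (itemY : Int) : Prop :=
  (∀ r ∈ rectangle, r.length = 4 ∧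
     (r.getD 0 0 > r.getD 2 0 ∨ r.getD 1 0 > r.getD 3 0 ∨
      (0 ≤ r.getD 0 0 ∧ r.getD 2 0 ≤ 50 ∧ 0 ≤ r.getD 1 0 ∧ r.getD 3 0 ≤ 50)))
  ∧ -50 ≤ characterX ∧ characterX ≤ 50 ∧ -50 ≤ characterY ∧ characterY ≤ 50
instance (rectangle : List (List Int)) (characterX : Int) (characterY : Int) (itemX : Int) (itemY : Int) : Decidable (Pre_solution rectangle characterX characterY itemX itemY) := by unfold Pre_solution; infer_instance

def pvWitness_solution : List (List Int) × Int × Int × Int × Int := ([[0, 0, 2, 2]], 0, 0, 2, 2)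

def Spec_solution (rectangle : List (List Int)) (characterX : Int) (characterY : Int) (itemX : Int) (itemY : Int) (out : Int) : Prop := out = solution_alt rectangle characterX characterY itemX itemY
instance (rectangle : List (List Int)) (characterX : Int) (characterY : Int) (itemX : Int) (itemY : Int) (out : Int) : Decidable (Spec_solution rectangle characterX characterY itemX itemY out) := by unfold Spec_solution; infer_instance

-- ===== CLAIM (what is proved, stated in full; the proofs are below) =====
def Claim_equal_solution : Prop := ∀ (rectangle : List (List Int)) (characterX : Int) (characterY : Int) (itemX : Int) (itemY : Int), Dom_solution rectangle characterX characterY itemX itemY → Pre_solution rectangle characterX characterY itemX itemY → Spec_solution rectangle characterX characterY itemX itemY (solution rectangle characterX characterY itemX itemY)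

-- ===== LEMMAS AND PROOFS =====
def GoodGrid (g : List (List Int)) : Prop :=
  g.length = 101 ∧ ∀ row ∈ g, row.length = 101

lemma gget_nonneg (g : List (List Int)) (i j : Int) (hi0 : 0 ≤ i) (hj0 : 0 ≤ j) :
    gget g i j = (g.getD i.toNat []).getD j.toNat 0 := by
  unfold gget
  rw [← Int.toNat_of_nonneg hi0, ← Int.toNat_of_nonneg hj0,
      PySem.List.pyGetD_natCast, PySem.List.pyGetD_natCast]
  simp only [Int.toNat_natCast]

lemma gset_nonneg (g : List (List Int)) (i j v : Int) (hi0 : 0 ≤ i) (hj0 : 0 ≤ j) :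
    gset g i j v = g.set i.toNat ((g.getD i.toNat []).set j.toNat v) := by
  unfold gset
  rw [PySem.List.pySetD_of_nonneg _ _ hj0, PySem.List.pySetD_of_nonneg _ _ hi0,
      ← Int.toNat_of_nonneg hi0, PySem.List.pyGetD_natCast]
  simp only [Int.toNat_natCast]

lemma goodGrid_rowlen (g : List (List Int)) (hg : GoodGrid g) (n : Nat) (hn : n < 101) :
    (g.getD n []).length = 101 := by
  obtain ⟨hl, hrows⟩ := hg
  apply hrows
  rw [List.getD_eq_getElem _ _ (by omega)]
  exact List.getElem_mem _

lemma goodGrid_gset (g : List (List Int)) (i j v : Int) (hg : GoodGrid g)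
    (hi0 : 0 ≤ i) (hi : i < 101) (hj0 : 0 ≤ j) (hj : j < 101) :
    GoodGrid (gset g i j v) := by
  rw [gset_nonneg g i j v hi0 hj0]
  obtain ⟨hl, hrows⟩ := hg
  refine ⟨by simp [hl], ?_⟩
  intro row hrow
  rcases List.mem_or_eq_of_mem_set hrow with h | h
  · exact hrows _ h
  · subst h
    rw [List.length_set]
    exact goodGrid_rowlen g ⟨hl, hrows⟩ i.toNat (by omega)

lemma gget_gset_same (g : List (List Int)) (i j v : Int) (hg : GoodGrid g)
    (hi0 : 0 ≤ i) (hi : i < 101) (hj0 : 0 ≤ j) (hj : j < 101) :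
    gget (gset g i j v) i j = v := by
  rw [gset_nonneg g i j v hi0 hj0, gget_nonneg _ i j hi0 hj0]
  have h1 : i.toNat < g.length := by obtain ⟨hl, _⟩ := hg; omega
  have h2 : j.toNat < (g.getD i.toNat []).length := by
    rw [goodGrid_rowlen g hg i.toNat (by omega)]; omega
  have hrow : (g.set i.toNat ((g.getD i.toNat []).set j.toNat v)).getD i.toNat []
      = (g.getD i.toNat []).set j.toNat v := by
    rw [List.getD_eq_getElem?_getD, List.getElem?_set_self h1]; simp
  rw [hrow, List.getD_eq_getElem?_getD, List.getElem?_set_self h2]; simp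

lemma gget_gset_other (g : List (List Int)) (i j i' j' v : Int) (hg : GoodGrid g)
    (hi0 : 0 ≤ i) (hi : i < 101) (hj0 : 0 ≤ j) (hj : j < 101)
    (hi0' : 0 ≤ i') (hj0' : 0 ≤ j')
    (hne : ¬(i' = i ∧ j' = j)) :
    gget (gset g i j v) i' j' = gget g i' j' := by
  rw [gset_nonneg g i j v hi0 hj0, gget_nonneg _ i' j' hi0' hj0', gget_nonneg g i' j' hi0' hj0']
  have h1 : i.toNat < g.length := by obtain ⟨hl, _⟩ := hg; omega
  by_cases hii : i'.toNat = i.toNat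
  · have hieq : i' = i := by omega
    have hjj : j.toNat ≠ j'.toNat := fun hcon => hne ⟨hieq, by omega⟩
    rw [hii]
    have hrow : (g.set i.toNat ((g.getD i.toNat []).set j.toNat v)).getD i.toNat []
        = (g.getD i.toNat []).set j.toNat v := by
      rw [List.getD_eq_getElem?_getD, List.getElem?_set_self h1]; simp
    rw [hrow, List.getD_eq_getElem?_getD, List.getElem?_set_ne hjj, ← List.getD_eq_getElem?_getD]
  · have hrow : (g.set i.toNat ((g.getD i.toNat []).set j.toNat v)).getD i'.toNat []
        = g.getD i'.toNat [] := by
      rw [List.getD_eq_getElem?_getD, List.getElem?_set_ne (fun h => hii h.symm),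
          ← List.getD_eq_getElem?_getD]
    rw [hrow]
def classify (rects : List (List Int)) (i j : Int) : Int :=
  if rects.any (fun r => rectStrict r i j) then -1
  else if rects.any (fun r => rectTouch r i j) then 1 else 0

def RectOK (r : List Int) : Prop := r.length = 4 ∧
  (r.getD 0 0 > r.getD 2 0 ∨ r.getD 1 0 > r.getD 3 0 ∨
   (0 ≤ r.getD 0 0 ∧ r.getD 2 0 ≤ 50 ∧ 0 ≤ r.getD 1 0 ∧ r.getD 3 0 ≤ 50))

-- effect of A's loop body on the value of the visited cell
def updVal (x1 y1 x2 y2 i j v : Int) : Int :=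
  if x1 * 2 < i ∧ i < x2 * 2 ∧ y1 * 2 < j ∧ j < y2 * 2 then -1
  else if v ≠ -1 then 1 else v

lemma updVal_idem (x1 y1 x2 y2 i j v : Int) :
    updVal x1 y1 x2 y2 i j (updVal x1 y1 x2 y2 i j v) = updVal x1 y1 x2 y2 i j v := by
  unfold updVal
  split_ifs <;> simp_all

lemma buildCell_good (x1 y1 x2 y2 i' j' : Int) (g : List (List Int)) (hg : GoodGrid g)
    (hi0 : 0 ≤ i') (hi : i' < 101) (hj0 : 0 ≤ j') (hj : j' < 101) :
    GoodGrid (buildCell x1 y1 x2 y2 i' j' g) := by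
  unfold buildCell
  split_ifs <;> first | exact goodGrid_gset g i' j' _ hg hi0 hi hj0 hj | exact hg

lemma buildCell_gget (x1 y1 x2 y2 i' j' i j : Int) (g : List (List Int)) (hg : GoodGrid g)
    (hi0 : 0 ≤ i') (hi : i' < 101) (hj0 : 0 ≤ j') (hj : j' < 101)
    (hi0' : 0 ≤ i) (hi' : i < 101) (hj0' : 0 ≤ j) (hj' : j < 101) :
    gget (buildCell x1 y1 x2 y2 i' j' g) i j =
      if i = i' ∧ j = j' then updVal x1 y1 x2 y2 i j (gget g i j) else gget g i j := by
  unfold buildCell updVal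
  by_cases heq : i = i' ∧ j = j'
  · obtain ⟨rfl, rfl⟩ := heq
    rw [if_pos (⟨rfl, rfl⟩ : i = i ∧ j = j)]
    split_ifs with h1 h2
    · exact gget_gset_same g i j _ hg hi0 hi hj0 hj
    · exact gget_gset_same g i j _ hg hi0 hi hj0 hj
    · rfl
  · rw [if_neg heq]
    split_ifs with h1 h2
    · exact gget_gset_other g i' j' i j _ hg hi0 hi hj0 hj hi0' hj0' heq
    · exact gget_gset_other g i' j' i j _ hg hi0 hi hj0 hj hi0' hj0' heq
    · rfl

lemma foldCol (x1 y1 x2 y2 i' : Int) (hi0 : 0 ≤ i') (hi : i' < 101) :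
    ∀ (ys : List Int) (g : List (List Int)), GoodGrid g → (∀ y ∈ ys, 0 ≤ y ∧ y < 101) →
    GoodGrid (ys.foldl (fun g j => buildCell x1 y1 x2 y2 i' j g) g) ∧
    ∀ i j : Int, 0 ≤ i → i < 101 → 0 ≤ j → j < 101 →
      gget (ys.foldl (fun g j => buildCell x1 y1 x2 y2 i' j g) g) i j =
        if i = i' ∧ j ∈ ys then updVal x1 y1 x2 y2 i j (gget g i j) else gget g i j := by
  intro ys
  induction ys with
  | nil => intro g hg _; exact ⟨hg, by intro i j _ _ _ _; simp⟩
  | cons y ys ih =>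
    intro g hg hmem
    have hy := hmem y (by simp)
    have hg1 : GoodGrid (buildCell x1 y1 x2 y2 i' y g) :=
      buildCell_good x1 y1 x2 y2 i' y g hg hi0 hi hy.1 hy.2
    obtain ⟨hgood, hval⟩ := ih (buildCell x1 y1 x2 y2 i' y g) hg1
      (fun z hz => hmem z (by simp [hz]))
    refine ⟨by simpa using hgood, ?_⟩
    intro i j hio hi1 hjo hj1
    have hstep := buildCell_gget x1 y1 x2 y2 i' y i j g hg hi0 hi hy.1 hy.2 hio hi1 hjo hj1
    simp only [List.foldl_cons]
    rw [hval i j hio hi1 hjo hj1, hstep]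
    by_cases hii : i = i'
    · subst hii
      by_cases hjy : j = y
      · subst hjy
        by_cases hjys : j ∈ ys <;>
          simp [hjys, updVal_idem]
      · by_cases hjys : j ∈ ys <;> simp [hjys, hjy]
    · simp [hii]

lemma foldRow (x1 y1 x2 y2 : Int) (ys : List Int) (hys : ∀ y ∈ ys, 0 ≤ y ∧ y < 101) :
    ∀ (xs : List Int) (g : List (List Int)), GoodGrid g → (∀ x ∈ xs, 0 ≤ x ∧ x < 101) →
    GoodGrid (xs.foldl (fun g i => ys.foldl (fun g j => buildCell x1 y1 x2 y2 i j g) g) g) ∧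
    ∀ i j : Int, 0 ≤ i → i < 101 → 0 ≤ j → j < 101 →
      gget (xs.foldl (fun g i => ys.foldl (fun g j => buildCell x1 y1 x2 y2 i j g) g) g) i j =
        if i ∈ xs ∧ j ∈ ys then updVal x1 y1 x2 y2 i j (gget g i j) else gget g i j := by
  intro xs
  induction xs with
  | nil => intro g hg _; exact ⟨hg, by intro i j _ _ _ _; simp⟩
  | cons x xs ih =>
    intro g hg hmem
    have hx := hmem x (by simp)
    obtain ⟨hg1, hval1⟩ := foldCol x1 y1 x2 y2 x hx.1 hx.2 ys g hg hys
    obtain ⟨hgood, hval⟩ := ih _ hg1 (fun z hz => hmem z (by simp [hz]))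
    refine ⟨by simpa using hgood, ?_⟩
    intro i j hio hi1 hjo hj1
    simp only [List.foldl_cons]
    rw [hval i j hio hi1 hjo hj1, hval1 i j hio hi1 hjo hj1]
    by_cases hix : i = x
    · subst hix
      by_cases hjys : j ∈ ys
      · by_cases hixs : i ∈ xs <;> simp [hixs, hjys, updVal_idem]
      · by_cases hixs : i ∈ xs <;> simp [hixs, hjys]
    · simp [hix]
def rVal (r : List Int) (i j v : Int) : Int :=
  if rectStrict r i j then -1 else if v ≠ -1 then 1 else v

lemma applyRect_char (r : List Int) (hr : RectOK r) (g : List (List Int)) (hg : GoodGrid g) :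
    GoodGrid (applyRect g r) ∧
    ∀ i j : Int, 0 ≤ i → i < 101 → 0 ≤ j → j < 101 →
      gget (applyRect g r) i j =
        if rectTouch r i j then rVal r i j (gget g i j) else gget g i j := by
  obtain ⟨hlen, hbounds⟩ := hr
  rcases r with _ | ⟨x1, r⟩ <;> simp at hlen
  rcases r with _ | ⟨y1, r⟩ <;> simp at hlen
  rcases r with _ | ⟨x2, r⟩ <;> simp at hlen
  rcases r with _ | ⟨y2, r⟩ <;> simp at hlen
  rcases r with _ | ⟨z, r⟩ <;> simp at hlen
  simp only [List.getD_cons_zero, List.getD_cons_succ] at hbounds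
  unfold applyRect rectTouch rVal rectStrict
  dsimp only
  by_cases hx : x2 * 2 + 1 ≤ x1 * 2
  · rw [PySem.List.pyRange_one_eq_nil hx]
    refine ⟨hg, ?_⟩
    intro i j _ _ _ _
    simp only [List.foldl_nil]
    rw [if_neg (by simp only [decide_eq_true_eq]; omega)]
  · by_cases hy : y2 * 2 + 1 ≤ y1 * 2
    · rw [PySem.List.pyRange_one_eq_nil hy]
      simp only [List.foldl_nil]
      rw [PySem.List.foldl_ignore]
      refine ⟨hg, ?_⟩
      intro i j _ _ _ _
      rw [if_neg (by simp only [decide_eq_true_eq]; omega)]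
    · have hb : 0 ≤ x1 ∧ x2 ≤ 50 ∧ 0 ≤ y1 ∧ y2 ≤ 50 := by omega
      have hxs : ∀ x ∈ PySem.List.pyRange (x1 * 2) (x2 * 2 + 1) 1, 0 ≤ x ∧ x < 101 := by
        intro x hxm
        rw [PySem.List.mem_pyRange_one] at hxm
        omega
      have hys : ∀ y ∈ PySem.List.pyRange (y1 * 2) (y2 * 2 + 1) 1, 0 ≤ y ∧ y < 101 := by
        intro y hym
        rw [PySem.List.mem_pyRange_one] at hym
        omega
      obtain ⟨hgood, hval⟩ := foldRow x1 y1 x2 y2 _ hys _ g hg hxs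
      refine ⟨hgood, ?_⟩
      intro i j hio hi1 hjo hj1
      rw [hval i j hio hi1 hjo hj1]
      by_cases ht : x1 * 2 ≤ i ∧ i ≤ x2 * 2 ∧ y1 * 2 ≤ j ∧ j ≤ y2 * 2
      · rw [if_pos ⟨by rw [PySem.List.mem_pyRange_one]; omega,
              by rw [PySem.List.mem_pyRange_one]; omega⟩,
            if_pos (by simpa using ht)]
        unfold updVal
        simp only [decide_eq_true_eq]
      · rw [if_neg (by
            rintro ⟨h1, h2⟩
            rw [PySem.List.mem_pyRange_one] at h1 h2
            omega),
          if_neg (by simpa using ht)]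

-- per-cell value evolution over the rectangle list
def valFold (rects : List (List Int)) (i j v : Int) : Int :=
  rects.foldl (fun v r => if rectTouch r i j then rVal r i j v else v) v

lemma rectStrict_touch (r : List Int) (i j : Int) (h : rectStrict r i j = true) :
    rectTouch r i j = true := by
  unfold rectStrict rectTouch at *
  rcases r with _ | ⟨x1, _ | ⟨y1, _ | ⟨x2, _ | ⟨y2, _ | ⟨z, r⟩⟩⟩⟩⟩ <;> simp_all <;> omega

lemma valFold_char (i j : Int) : ∀ (rects : List (List Int)) (v : Int),
    valFold rects i j v =
      if rects.any (fun r => rectStrict r i j) then -1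
      else if rects.any (fun r => rectTouch r i j) then (if v = -1 then -1 else 1) else v := by
  intro rects
  induction rects with
  | nil => intro v; simp [valFold]
  | cons r rs ih =>
    intro v
    have hstep : valFold (r :: rs) i j v =
        valFold rs i j (if rectTouch r i j then rVal r i j v else v) := rfl
    rw [hstep, ih]
    have hst := rectStrict_touch r i j
    by_cases hs : rectStrict r i j = true <;> by_cases ht : rectTouch r i j = true <;>
      by_cases hs' : rs.any (fun r => rectStrict r i j) = true <;>
      by_cases ht' : rs.any (fun r => rectTouch r i j) = true <;>
      by_cases hv : v = -1 <;>
      simp_all [rVal]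

lemma gget_init (i j : Int) (hi0 : 0 ≤ i) (hi : i < 101) (hj0 : 0 ≤ j) (hj : j < 101) :
    gget (List.replicate 101 (List.replicate 101 (0 : Int))) i j = 0 := by
  rw [gget_nonneg _ i j hi0 hj0]
  have h1 : i.toNat < 101 := by omega
  have h2 : j.toNat < 101 := by omega
  rw [show (List.replicate 101 (List.replicate 101 (0 : Int))).getD i.toNat [] =
        List.replicate 101 (0 : Int) from by
      rw [List.getD_eq_getElem?_getD, List.getElem?_replicate, if_pos h1, Option.getD_some]]
  rw [List.getD_eq_getElem?_getD, List.getElem?_replicate, if_pos h2, Option.getD_some]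

lemma goodGrid_init : GoodGrid (List.replicate 101 (List.replicate 101 (0 : Int))) := by
  refine ⟨by simp, ?_⟩
  intro row hrow
  rw [List.eq_of_mem_replicate hrow]
  simp

lemma buildGrid_char (rects : List (List Int)) (hr : ∀ r ∈ rects, RectOK r) :
    GoodGrid (buildGrid rects) ∧
    ∀ i j : Int, 0 ≤ i → i < 101 → 0 ≤ j → j < 101 →
      gget (buildGrid rects) i j = classify rects i j := by
  unfold buildGrid
  have main : ∀ (l : List (List Int)), (∀ r ∈ l, RectOK r) →
      ∀ (g : List (List Int)), GoodGrid g →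
      GoodGrid (l.foldl applyRect g) ∧
      ∀ i j : Int, 0 ≤ i → i < 101 → 0 ≤ j → j < 101 →
        gget (l.foldl applyRect g) i j = valFold l i j (gget g i j) := by
    intro l
    induction l with
    | nil => intro _ g hg; exact ⟨hg, by intro i j _ _ _ _; simp [valFold]⟩
    | cons r rs ih =>
      intro hok g hg
      obtain ⟨hg1, hv1⟩ := applyRect_char r (hok r (by simp)) g hg
      obtain ⟨hgood, hval⟩ := ih (fun z hz => hok z (by simp [hz])) _ hg1
      refine ⟨by simpa using hgood, ?_⟩
      intro i j hio hi1 hjo hj1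
      simp only [List.foldl_cons]
      rw [hval i j hio hi1 hjo hj1, hv1 i j hio hi1 hjo hj1]
      rfl
  obtain ⟨hgood, hval⟩ := main rects hr _ goodGrid_init
  refine ⟨hgood, ?_⟩
  intro i j hio hi1 hjo hj1
  rw [hval i j hio hi1 hjo hj1, gget_init i j hio hi1 hjo hj1, valFold_char]
  unfold classify
  split_ifs <;> simp_all
lemma walkGo_eq (i j : Int) : ∀ (rects : List (List Int)) (b : Bool),
    walkGo rects i j b =
      (!rects.any (fun r => rectStrict r i j) && (b || rects.any (fun r => rectTouch r i j))) := by
  intro rects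
  induction rects with
  | nil => simp [walkGo]
  | cons r rs ih =>
    intro b
    simp only [walkGo, List.any_cons]
    by_cases h : rectStrict r i j = true
    · simp [h]
    · simp only [Bool.not_eq_true] at h
      simp [h, ih]
      cases b <;> cases h2 : rectTouch r i j <;> simp [Bool.or_comm]

lemma walkable_iff (rects : List (List Int)) (i j : Int) :
    walkable rects i j = true ↔ classify rects i j = 1 := by
  unfold walkable classify
  rw [walkGo_eq]
  by_cases hs : rects.any (fun r => rectStrict r i j) = true
  · simp [hs]
  · simp only [Bool.not_eq_true] at hs
    by_cases ht : rects.any (fun r => rectTouch r i j) = true <;> simp [hs, ht]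

-- the 101×101 doubled board, and the number of its cells not yet visited
def cells : List (Int × Int) := (PySem.List.pyRange 0 101 1) ×ˢ (PySem.List.pyRange 0 101 1)

def ucount (v : List (Int × Int)) : Nat := (cells.filter (fun c => decide (c ∉ v))).length

lemma mem_cells (i j : Int) : (i, j) ∈ cells ↔ 0 ≤ i ∧ i < 101 ∧ 0 ≤ j ∧ j < 101 := by
  unfold cells
  rw [show ((PySem.List.pyRange 0 101 1) ×ˢ (PySem.List.pyRange 0 101 1) : List (Int × Int)) =
      (PySem.List.pyRange 0 101 1).product (PySem.List.pyRange 0 101 1) from rfl,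
    List.pair_mem_product, PySem.List.mem_pyRange_one, PySem.List.mem_pyRange_one]
  omega

lemma nodup_cells : cells.Nodup :=
  List.Nodup.product (PySem.List.nodup_pyRange_one 0 101) (PySem.List.nodup_pyRange_one 0 101)

lemma ucount_le (v : List (Int × Int)) : ucount v ≤ 10201 := by
  unfold ucount
  calc (cells.filter _).length ≤ cells.length := List.length_filter_le _ _
  _ = 10201 := by
      unfold cells
      rw [List.length_product, PySem.List.length_pyRange_one]
      rfl

lemma ucount_add (v : List (Int × Int)) (c : Int × Int) (hc : c ∈ cells) (hv : c ∉ v) :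
    ucount (PySem.Set.add v c) + 1 = ucount v := by
  unfold ucount
  rw [← List.countP_eq_length_filter, ← List.countP_eq_length_filter]
  have key : ∀ (l : List (Int × Int)), l.Nodup → c ∈ l →
      l.countP (fun x => decide (x ∉ v)) =
        l.countP (fun x => decide (x ∉ PySem.Set.add v c)) + 1 := by
    intro l hnd hcl
    obtain ⟨s, t, rfl⟩ := List.append_of_mem hcl
    have hcs : c ∉ s := fun h => (List.disjoint_of_nodup_append hnd h (by simp))
    have hct : c ∉ t := by
      have := (List.nodup_append.mp hnd).2.1
      simp at this
      exact this.1
    have hagree : ∀ x, x ≠ c →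
        (decide (x ∉ v) : Bool) = decide (x ∉ PySem.Set.add v c) := by
      intro x hx
      have : x ∈ PySem.Set.add v c ↔ x ∈ v := by
        rw [PySem.Set.mem_add]
        simp [hx]
      simp [this]
    rw [List.countP_append, List.countP_append, List.countP_cons, List.countP_cons]
    rw [List.countP_congr (fun x hx => by rw [hagree x (fun h => hcs (h ▸ hx))]),
        List.countP_congr (l := t) (fun x hx => by rw [hagree x (fun h => hct (h ▸ hx))])]
    simp [hv, PySem.Set.mem_add]
    omega
  rw [key cells nodup_cells hc]

-- the bisimulation invariant: A's grid and B's visited set describe the same BFS state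
def RInv (rects g : List (List Int)) (v : List (Int × Int)) : Prop :=
  GoodGrid g ∧ ∀ i j : Int, 0 ≤ i → i < 101 → 0 ≤ j → j < 101 →
    gget g i j = if (i, j) ∈ v then 2 else classify rects i j

lemma oneStep (rects : List (List Int)) (d : Int) (K : Nat)
    (s : List (List Int) × List (Int × Int))
    (t : PySem.Set (Int × Int) × List ((Int × Int) × Int)) (nx ny : Int)
    (h : RInv rects s.1 t.1) (hacc : t.2 = s.2.map (fun c => (c, d + 1)))
    (hK : ucount t.1 + t.2.length = K) :
    RInv rects (aStep s nx ny).1 (bStep rects d t nx ny).1 ∧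
    (bStep rects d t nx ny).2 = (aStep s nx ny).2.map (fun c => (c, d + 1)) ∧
    ucount (bStep rects d t nx ny).1 + (bStep rects d t nx ny).2.length = K := by
  obtain ⟨hgood, hval⟩ := h
  unfold aStep bStep
  by_cases hguard : 0 ≤ nx ∧ nx < 101 ∧ 0 ≤ ny ∧ ny < 101 ∧ gget s.1 nx ny = 1
  · obtain ⟨h1, h2, h3, h4, h5⟩ := hguard
    have hcell := hval nx ny h1 h2 h3 h4
    have hnm : (nx, ny) ∉ t.1 := by
      intro hmem
      rw [if_pos hmem] at hcell
      omega
    have hcls : classify rects nx ny = 1 := by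
      rw [if_neg hnm] at hcell
      omega
    have hbguard : (decide (0 ≤ nx ∧ nx < 101 ∧ 0 ≤ ny ∧ ny < 101) &&
        !(PySem.Set.contains t.1 (nx, ny)) && walkable rects nx ny) = true := by
      simp only [Bool.and_eq_true, decide_eq_true_eq, Bool.not_eq_true']
      exact ⟨⟨⟨h1, h2, h3, h4⟩, by
        rw [← Bool.not_eq_true]
        simp [hnm]⟩, (walkable_iff rects nx ny).mpr hcls⟩
    rw [if_pos ⟨h1, h2, h3, h4, h5⟩, if_pos hbguard]
    refine ⟨⟨goodGrid_gset _ nx ny 2 hgood h1 h2 h3 h4, ?_⟩, ?_, ?_⟩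
    · intro i j hi0 hi hj0 hj
      by_cases heq : i = nx ∧ j = ny
      · obtain ⟨rfl, rfl⟩ := heq
        rw [gget_gset_same _ i j 2 hgood hi0 hi hj0 hj,
            if_pos (by rw [PySem.Set.mem_add]; right; rfl)]
      · rw [gget_gset_other _ nx ny i j 2 hgood h1 h2 h3 h4 hi0 hj0 heq]
        have : (i, j) ∈ PySem.Set.add t.1 (nx, ny) ↔ (i, j) ∈ t.1 := by
          rw [PySem.Set.mem_add]
          constructor
          · rintro (hm | hm)
            · exact hm
            · exact absurd (Prod.mk.injEq .. ▸ hm) (by simpa using heq)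
          · exact Or.inl
        rw [hval i j hi0 hi hj0 hj]
        by_cases hm : (i, j) ∈ t.1
        · rw [if_pos hm, if_pos (this.mpr hm)]
        · rw [if_neg hm, if_neg (fun hcon => hm (this.mp hcon))]
    · simp [hacc]
    · have := ucount_add t.1 (nx, ny) ((mem_cells nx ny).mpr ⟨h1, h2, h3, h4⟩) hnm
      simp only [List.length_append, List.length_cons, List.length_nil]
      omega
  · have hbguard : (decide (0 ≤ nx ∧ nx < 101 ∧ 0 ≤ ny ∧ ny < 101) &&
        !(PySem.Set.contains t.1 (nx, ny)) && walkable rects nx ny) = false := by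
      by_contra hcon
      rw [Bool.not_eq_false] at hcon
      simp only [Bool.and_eq_true, decide_eq_true_eq, Bool.not_eq_true'] at hcon
      obtain ⟨⟨⟨h1, h2, h3, h4⟩, hnm⟩, hw⟩ := hcon
      apply hguard
      have hnm' : (nx, ny) ∉ t.1 := by
        intro hm
        rw [(PySem.Set.contains_iff t.1 (nx, ny)).mpr hm] at hnm
        exact absurd hnm (by simp)
      refine ⟨h1, h2, h3, h4, ?_⟩
      rw [hval nx ny h1 h2 h3 h4, if_neg hnm', (walkable_iff rects nx ny).mp hw]
    rw [if_neg hguard, if_neg (by rw [hbguard]; exact Bool.false_ne_true)]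
    exact ⟨⟨hgood, hval⟩, hacc, hK⟩
lemma expandSim (rects : List (List Int)) (x y d : Int) (g : List (List Int))
    (v : PySem.Set (Int × Int)) (h : RInv rects g v) :
    RInv rects (aExpand g x y).1 (bExpand rects v x y d).1 ∧
    (bExpand rects v x y d).2 = (aExpand g x y).2.map (fun c => (c, d + 1)) ∧
    ucount (bExpand rects v x y d).1 + (bExpand rects v x y d).2.length = ucount v := by
  have h0 : ucount (v, ([] : List ((Int × Int) × Int))).1 +
      (v, ([] : List ((Int × Int) × Int))).2.length = ucount v := by simp
  unfold aExpand bExpand dirsA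
  simp only [List.foldl_cons, List.foldl_nil, add_zero]
  have t1 := oneStep rects d (ucount v) (g, []) (v, []) (x + 1) y h rfl h0
  have t2 := oneStep rects d (ucount v) _ _ x (y + 1) t1.1 t1.2.1 t1.2.2
  have t3 := oneStep rects d (ucount v) _ _ (x - 1) y t2.1 t2.2.1 t2.2.2
  have t4 := oneStep rects d (ucount v) _ _ x (y - 1) t3.1 t3.2.1 t3.2.2
  exact t4

lemma bLoop_nil (rects : List (List Int)) (tX tY : Int) (v : PySem.Set (Int × Int)) :
    ∀ fb : Nat, bLoop rects tX tY fb v [] = -1 := by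
  intro fb
  cases fb <;> rfl

lemma aLoop_nil (iX iY : Int) (g : List (List Int)) (d : Int) :
    ∀ fa : Nat, aLoop iX iY fa g [] d = -1 := by
  intro fa
  cases fa <;> rfl

lemma innerSim (rects : List (List Int)) (iX iY : Int) (d : Int) :
    ∀ (qf acc : List (Int × Int)) (g : List (List Int)) (v : PySem.Set (Int × Int)) (fb : Nat),
    RInv rects g v → 2 * ucount v + qf.length + acc.length ≤ fb →
    (∀ r, aInner iX iY g (qf ++ acc) d qf.length = .inl r →
        bLoop rects (iX * 2) (iY * 2) fb v
          (qf.map (fun c => (c, d)) ++ acc.map (fun c => (c, d + 1))) = r) ∧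
    (∀ g' q', aInner iX iY g (qf ++ acc) d qf.length = .inr (g', q') →
        ∃ v', RInv rects g' v' ∧ ucount v' + q'.length = ucount v + acc.length ∧
          bLoop rects (iX * 2) (iY * 2) fb v
              (qf.map (fun c => (c, d)) ++ acc.map (fun c => (c, d + 1))) =
            bLoop rects (iX * 2) (iY * 2) (fb - qf.length) v' (q'.map (fun c => (c, d + 1)))) := by
  intro qf
  induction qf with
  | nil =>
    intro acc g v fb h hfb
    constructor
    · intro r hr
      simp [aInner] at hr
    · intro g' q' hr
      simp only [List.nil_append, List.length_nil, aInner] at hr ⊢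
      obtain ⟨rfl, rfl⟩ : g = g' ∧ acc = q' := by
        constructor <;> injection hr with h1 <;> first
          | exact congrArg Prod.fst h1 | exact congrArg Prod.snd h1
      exact ⟨v, h, by omega, by simp⟩
  | cons hd rest ih =>
    intro acc g v fb h hfb
    obtain ⟨x, y⟩ := hd
    obtain ⟨fb', rfl⟩ : ∃ fb', fb = fb' + 1 := by
      refine ⟨fb - 1, ?_⟩
      simp only [List.length_cons] at hfb
      omega
    simp only [List.cons_append, List.length_cons, List.map_cons]
    by_cases ht : x = iX * 2 ∧ y = iY * 2
    · constructor
      · intro r hr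
        simp only [aInner, if_pos ht] at hr
        injection hr with h1
        subst h1
        show bLoop _ _ _ _ _ (((x, y), d) :: _) = _
        simp only [bLoop, if_pos ht]
      · intro g' q' hr
        simp only [aInner, if_pos ht] at hr
        exact absurd hr (by simp)
    · have hstepA : aInner iX iY g ((x, y) :: (rest ++ acc)) d (rest.length + 1) =
          aInner iX iY (aExpand g x y).1 ((rest ++ acc) ++ (aExpand g x y).2) d rest.length := by
        simp only [aInner, if_neg ht]
      obtain ⟨hinv, hacc2, hcnt⟩ := expandSim rects x y d g v h
      have hqueue : (rest ++ acc) ++ (aExpand g x y).2 = rest ++ (acc ++ (aExpand g x y).2) :=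
        List.append_assoc _ _ _
      have hstepB : bLoop rects (iX * 2) (iY * 2) (fb' + 1) v
            (((x, y), d) :: (rest.map (fun c => (c, d)) ++ acc.map (fun c => (c, d + 1)))) =
          bLoop rects (iX * 2) (iY * 2) fb' (bExpand rects v x y d).1
            ((rest.map (fun c => (c, d)) ++ acc.map (fun c => (c, d + 1))) ++
              (bExpand rects v x y d).2) := by
        simp only [bLoop, if_neg ht]
      have hbq : (rest.map (fun c => (c, d)) ++ acc.map (fun c => (c, d + 1))) ++
            (bExpand rects v x y d).2 =
          rest.map (fun c => (c, d)) ++ (acc ++ (aExpand g x y).2).map (fun c => (c, d + 1)) := by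
        rw [hacc2, List.map_append, List.append_assoc]
      have hfb' : 2 * ucount (bExpand rects v x y d).1 + rest.length +
          (acc ++ (aExpand g x y).2).length ≤ fb' := by
        have hlen : (bExpand rects v x y d).2.length = (aExpand g x y).2.length := by
          rw [hacc2, List.length_map]
        simp only [List.length_cons] at hfb
        simp only [List.length_append]
        omega
      obtain ⟨ihl, ihr⟩ := ih (acc ++ (aExpand g x y).2) (aExpand g x y).1
        (bExpand rects v x y d).1 fb' hinv hfb'
      constructor
      · intro r hr
        rw [hstepA, hqueue] at hr
        rw [hstepB, hbq]
        exact ihl r hr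
      · intro g' q' hr
        rw [hstepA, hqueue] at hr
        obtain ⟨v', hv1, hv2, hv3⟩ := ihr g' q' hr
        refine ⟨v', hv1, ?_, ?_⟩
        · have hlen : (bExpand rects v x y d).2.length = (aExpand g x y).2.length := by
            rw [hacc2, List.length_map]
          simp only [List.length_append] at hv2
          omega
        · rw [hstepB, hbq, hv3, Nat.succ_sub_succ]

lemma levelSim (rects : List (List Int)) (iX iY : Int) :
    ∀ (fa : Nat) (g : List (List Int)) (q : List (Int × Int)) (d : Int)
      (v : PySem.Set (Int × Int)) (fb : Nat),
    RInv rects g v → ucount v + 1 ≤ fa → 2 * ucount v + q.length ≤ fb →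
    aLoop iX iY fa g q d = bLoop rects (iX * 2) (iY * 2) fb v (q.map (fun c => (c, d))) := by
  intro fa
  induction fa with
  | zero => intro g q d v fb h h1 h2; omega
  | succ fa ih =>
    intro g q d v fb h h1 h2
    cases q with
    | nil =>
      simp only [List.map_nil]
      rw [bLoop_nil]
      rfl
    | cons c q0 =>
      have hne : ((c :: q0).isEmpty) = false := rfl
      obtain ⟨hinl, hinr⟩ := innerSim rects iX iY d (c :: q0) [] g v fb h
        (by simpa using h2)
      simp only [List.append_nil, List.map_nil, List.append_nil] at hinl hinr
      show (if (c :: q0).isEmpty then _ else _) = _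
      rw [if_neg (by simp)]
      cases hres : aInner iX iY g (c :: q0) d (c :: q0).length with
      | inl r =>
        rw [hinl r hres]
      | inr pr =>
        obtain ⟨g', q'⟩ := pr
        obtain ⟨v', hv1, hv2, hv3⟩ := hinr g' q' hres
        rw [hv3]
        show aLoop iX iY fa g' q' (d + 1) = _
        cases q' with
        | nil =>
          simp only [List.map_nil]
          rw [bLoop_nil, aLoop_nil]
        | cons c' q0' =>
          rw [← ih g' (c' :: q0') (d + 1) v' (fb - (c :: q0).length) hv1
            (by simp only [List.length_cons, List.length_nil] at hv2 ⊢; omega)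
            (by simp only [List.length_cons, List.length_nil] at hv2 h2 ⊢; omega)]
lemma aStep_out (s : List (List Int) × List (Int × Int)) (nx ny : Int)
    (h : ¬(0 ≤ nx ∧ nx < 101 ∧ 0 ≤ ny ∧ ny < 101)) : aStep s nx ny = s := by
  unfold aStep
  rw [if_neg (by tauto)]

lemma bStep_out (rects : List (List Int)) (d : Int)
    (t : PySem.Set (Int × Int) × List ((Int × Int) × Int)) (nx ny : Int)
    (h : ¬(0 ≤ nx ∧ nx < 101 ∧ 0 ≤ ny ∧ ny < 101)) : bStep rects d t nx ny = t := by
  unfold bStep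
  rw [if_neg (by
    simp only [Bool.and_eq_true, decide_eq_true_eq]
    tauto)]

lemma aExpand_dead (g : List (List Int)) (x y : Int) (h : x ≤ -2 ∨ y ≤ -2) :
    aExpand g x y = (g, []) := by
  unfold aExpand dirsA
  simp only [List.foldl_cons, List.foldl_nil, add_zero]
  rw [aStep_out _ _ _ (by omega), aStep_out _ _ _ (by omega),
      aStep_out _ _ _ (by omega), aStep_out _ _ _ (by omega)]

lemma bExpand_dead (rects : List (List Int)) (v : PySem.Set (Int × Int)) (x y d : Int)
    (h : x ≤ -2 ∨ y ≤ -2) : bExpand rects v x y d = (v, []) := by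
  unfold bExpand
  simp only [List.foldl_cons, List.foldl_nil]
  rw [bStep_out _ _ _ _ _ (by omega), bStep_out _ _ _ _ _ (by omega),
      bStep_out _ _ _ _ _ (by omega), bStep_out _ _ _ _ _ (by omega)]

lemma aLoop_succ (iX iY : Int) (f : Nat) (g : List (List Int)) (q : List (Int × Int)) (d : Int) :
    aLoop iX iY (f + 1) g q d =
      if q.isEmpty then -1
      else match aInner iX iY g q d q.length with
        | .inl r => r
        | .inr (g', q') => aLoop iX iY f g' q' (d + 1) := rfl

lemma bLoop_succ (rects : List (List Int)) (tX tY : Int) (f : Nat)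
    (v : PySem.Set (Int × Int)) (q : List ((Int × Int) × Int)) :
    bLoop rects tX tY (f + 1) v q =
      match q with
      | [] => -1
      | ((x, y), d) :: rest =>
        if x = tX ∧ y = tY then PySem.Int.floordiv d 2
        else
          let s := bExpand rects v x y d
          bLoop rects tX tY f s.1 (rest ++ s.2) := rfl

lemma solution_eq_alt : ∀ (rectangle : List (List Int)) (characterX characterY itemX itemY : Int),
    (∀ r ∈ rectangle, r.length = 4 ∧
       (r.getD 0 0 > r.getD 2 0 ∨ r.getD 1 0 > r.getD 3 0 ∨
        (0 ≤ r.getD 0 0 ∧ r.getD 2 0 ≤ 50 ∧ 0 ≤ r.getD 1 0 ∧ r.getD 3 0 ≤ 50)))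
    → -50 ≤ characterX → characterX ≤ 50 → -50 ≤ characterY → characterY ≤ 50 →
    solution rectangle characterX characterY itemX itemY =
      solution_alt rectangle characterX characterY itemX itemY := by
  intro rects cX cY iX iY hrects hcx1 hcx2 hcy1 hcy2
  show aLoop iX iY 1000000 (gset (buildGrid rects) (cX * 2) (cY * 2) 2) [(cX * 2, cY * 2)] 0 =
    bLoop rects (iX * 2) (iY * 2) 1000000 (PySem.Set.ofList [(cX * 2, cY * 2)])
      [((cX * 2, cY * 2), 0)]
  by_cases hpos : 0 ≤ cX ∧ 0 ≤ cY
  · obtain ⟨hgood0, hval0⟩ := buildGrid_char rects (fun r hr => hrects r hr)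
    have hb1 : (0:Int) ≤ cX * 2 := by omega
    have hb2 : cX * 2 < 101 := by omega
    have hb3 : (0:Int) ≤ cY * 2 := by omega
    have hb4 : cY * 2 < 101 := by omega
    have hinv : RInv rects (gset (buildGrid rects) (cX * 2) (cY * 2) 2) [(cX * 2, cY * 2)] := by
      refine ⟨goodGrid_gset _ _ _ 2 hgood0 hb1 hb2 hb3 hb4, ?_⟩
      intro i j hi0 hi hj0 hj
      by_cases heq : i = cX * 2 ∧ j = cY * 2
      · obtain ⟨rfl, rfl⟩ := heq
        rw [gget_gset_same _ _ _ 2 hgood0 hb1 hb2 hb3 hb4, if_pos (by simp)]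
      · rw [gget_gset_other _ _ _ i j 2 hgood0 hb1 hb2 hb3 hb4 hi0 hj0 heq,
            hval0 i j hi0 hi hj0 hj,
            if_neg (by
              simp only [List.mem_singleton, Prod.mk.injEq]
              exact heq)]
    have hu := ucount_le [(cX * 2, cY * 2)]
    exact levelSim rects iX iY 1000000 _ [(cX * 2, cY * 2)] 0 [(cX * 2, cY * 2)] 1000000
      hinv (by omega) (by simp only [List.length_cons, List.length_nil]; omega)
  · have hdead : cX * 2 ≤ -2 ∨ cY * 2 ≤ -2 := by
      rcases not_and_or.mp hpos with h | h
      · left; omega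
      · right; omega
    have hI : aInner iX iY (gset (buildGrid rects) (cX * 2) (cY * 2) 2)
        [(cX * 2, cY * 2)] 0 1 =
        (if cX * 2 = iX * 2 ∧ cY * 2 = iY * 2 then .inl (PySem.Int.floordiv 0 2)
         else .inr (gset (buildGrid rects) (cX * 2) (cY * 2) 2, [])) := by
      by_cases ht : cX * 2 = iX * 2 ∧ cY * 2 = iY * 2
      · simp only [aInner, if_pos ht]
      · simp only [aInner, if_neg ht, aExpand_dead _ _ _ hdead]
        rfl
    rw [show (1000000 : Nat) = 999999 + 1 from rfl]
    rw [aLoop_succ, bLoop_succ,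
        if_neg (by simp), show ([(cX * 2, cY * 2)] : List (Int × Int)).length = 1 from rfl, hI]
    dsimp only
    rw [bExpand_dead _ _ _ _ _ hdead]
    by_cases ht : cX * 2 = iX * 2 ∧ cY * 2 = iY * 2
    · rw [if_pos ht, if_pos ht]
    · rw [if_neg ht, if_neg ht]
      exact (aLoop_nil iX iY _ (0 + 1) 999999).trans
        (bLoop_nil rects (iX * 2) (iY * 2) _ 999999).symm

-- ===== VERDICT (by name: the statement is the Claim_ definition above) =====
theorem solution_spec : Claim_equal_solution := by
  intro rects cX cY iX iY hdom hpre
  exact solution_eq_alt rects cX cY iX iY hpre.1 hpre.2.1 hpre.2.2.1 hpre.2.2.2.1 hpre.2.2.2.2
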